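-- pv_equiv track=rewrite | github.com/taikoma/TennisVideoAnalysis | src/score.py | create_index_shot
-- ===== SOURCE A (Python) =====
-- def create_index_shot(score_frame, shot_frame):
--     """scoreフレームとshotフレームを比較してshotのindexを作成
--     score_frameが変化したときにshotのindexを振りなおす
--     各shot_frameが何番目のframeに存在するかのindexを作成
--     Parameters
--     -----------
--     score_frame:[int] [0, 100, 200, 300, 400, 500]
--     shot_frame:[int] [50,80,130,250,450,550,1000,3200]
--     Returns
--     array_shot:[int]
--     """
--     shot_index = []
--
--     for i in range(len(shot_frame)):
--         s = 0
--         for j in range(len(score_frame)):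
--             if shot_frame[i] > score_frame[j]:
--                 s = j
--         shot_index.append(s)
--
--     return shot_index
-- ===== SOURCE B (Python) =====
-- def create_index_shot(score_frame, shot_frame):
--     # Backward scan with early exit: the answer for shot x is the LAST index j
--     # with score_frame[j] < x (0 if none), so scan from the end and stop at the
--     # first hit instead of sweeping the whole list keeping the last write.
--     n = len(score_frame)
--
--     def last_below(x):
--         for j in range(n - 1, -1, -1):
--             if score_frame[j] < x:
--                 return j
--         return 0
--
--     return [last_below(x) for x in shot_frame]
-- ===== Notes on version B (the rewrite author's own statement) =====
-- stated objective: alternative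
-- what changed: Per shot, A sweeps score_frame forward keeping the last index that satisfies the comparison; B scans score_frame backward and returns at the first index whose value is below the shot (early exit), with the list comprehension replacing the index-driven outer loop.
import Mathlib
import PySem

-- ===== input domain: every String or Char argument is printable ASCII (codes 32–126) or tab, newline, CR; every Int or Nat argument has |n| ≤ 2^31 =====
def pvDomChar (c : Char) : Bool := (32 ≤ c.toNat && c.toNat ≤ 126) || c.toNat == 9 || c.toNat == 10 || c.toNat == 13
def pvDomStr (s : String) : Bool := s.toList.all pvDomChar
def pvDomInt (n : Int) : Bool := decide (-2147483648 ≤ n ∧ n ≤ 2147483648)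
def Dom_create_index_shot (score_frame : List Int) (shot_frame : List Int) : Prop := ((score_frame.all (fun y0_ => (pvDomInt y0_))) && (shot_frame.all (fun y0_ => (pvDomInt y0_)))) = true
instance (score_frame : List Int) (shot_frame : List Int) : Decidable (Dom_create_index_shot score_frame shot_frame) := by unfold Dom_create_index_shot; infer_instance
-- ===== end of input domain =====

-- B replaces A's forward keep-the-last-match sweep by a backward early-exit scan; return value only.

-- ===== PORT A =====
-- inner loop: s = 0; for j in range(len(score_frame)): if x > score_frame[j]: s = j
def pvInnerA (score_frame : List Int) (x : Int) : Int :=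
  (PySem.List.enumerate score_frame 0).foldl (fun s jv => if x > jv.2 then jv.1 else s) 0

def create_index_shot (score_frame : List Int) (shot_frame : List Int) : List Int :=
  shot_frame.foldl (fun shot_index x => shot_index ++ [pvInnerA score_frame x]) []

-- ===== PORT B =====
-- for j in range(n-1, -1, -1): if score_frame[j] < x: return j ; return 0
-- (counter k means: next index examined is k-1)
def pvLastBelow (score_frame : List Int) (x : Int) : Nat → Int
  | 0 => 0
  | k + 1 => if score_frame.getD k 0 < x then (k : Int) else pvLastBelow score_frame x k

def create_index_shot_alt (score_frame : List Int) (shot_frame : List Int) : List Int :=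
  shot_frame.map (fun x => pvLastBelow score_frame x score_frame.length)

-- ===== PRECONDITION & SPEC =====
def Spec_create_index_shot (score_frame : List Int) (shot_frame : List Int) (out : List Int) : Prop := out = create_index_shot_alt score_frame shot_frame
instance (score_frame : List Int) (shot_frame : List Int) (out : List Int) : Decidable (Spec_create_index_shot score_frame shot_frame out) := by unfold Spec_create_index_shot; infer_instance

-- ===== CLAIM (what is proved, stated in full; the proofs are below) =====
def Claim_equal_create_index_shot : Prop := ∀ (score_frame : List Int) (shot_frame : List Int), Dom_create_index_shot score_frame shot_frame → Spec_create_index_shot score_frame shot_frame (create_index_shot score_frame shot_frame)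

-- ===== LEMMAS AND PROOFS =====

-- pvLastBelow only inspects indices below k, so appending an element is invisible for k ≤ length
theorem pvLastBelow_append {score : List Int} (v x : Int) :
    ∀ k, k ≤ score.length → pvLastBelow (score ++ [v]) x k = pvLastBelow score x k := by
  intro k
  induction k with
  | zero => intro _; rfl
  | succ k ih =>
    intro hk
    have hk' : k < score.length := Nat.lt_of_succ_le hk
    have hget : (score ++ [v]).getD k 0 = score.getD k 0 := by
      simp [List.getD_eq_getElem?_getD, List.getElem?_append_left hk']
    simp only [pvLastBelow, hget, ih (Nat.le_of_lt hk')]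

-- A's inner last-write sweep equals B's backward early-exit scan
theorem pvInnerA_eq_lastBelow (score : List Int) (x : Int) :
    pvInnerA score x = pvLastBelow score x score.length := by
  induction score using List.reverseRecOn with
  | nil => rfl
  | append_singleton score v ih =>
    have h1 : pvInnerA (score ++ [v]) x
        = if x > v then ((score.length : Int)) else pvInnerA score x := by
      simp [pvInnerA, PySem.List.enumerate_append, PySem.List.enumerate_cons]
    have h2 : pvLastBelow (score ++ [v]) x (score ++ [v]).length
        = if v < x then ((score.length : Int)) else pvLastBelow score x score.length := by
      have : (score ++ [v]).length = score.length + 1 := by simp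
      rw [this]
      simp only [pvLastBelow]
      have hget : (score ++ [v]).getD score.length 0 = v := by
        simp [List.getD_eq_getElem?_getD]
      rw [hget, pvLastBelow_append v x score.length (le_refl _)]
    rw [h1, h2, ih]

theorem foldl_append_eq_map {α β : Type} (f : α → β) (xs : List α) (acc : List β) :
    xs.foldl (fun r x => r ++ [f x]) acc = acc ++ xs.map f := by
  induction xs generalizing acc with
  | nil => simp
  | cons y ys ih => simp [List.foldl, ih]

-- ===== VERDICT (by name: the statement is the Claim_ definition above) =====
theorem create_index_shot_spec : Claim_equal_create_index_shot := by
  intro score shot _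
  unfold Spec_create_index_shot create_index_shot create_index_shot_alt
  rw [foldl_append_eq_map]
  simp [pvInnerA_eq_lastBelow]
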